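-- pv_equiv track=rewrite | github.com/tnn1t1s/piensa | src/evaluate.py | extract_choice
-- ===== SOURCE A (Python) =====
-- from typing import Optional
--
-- def extract_choice(response: str, options: list[str]) -> Optional[str]:
--     """
--     Extract a choice from a model response.
--
--     Args:
--         response: Model's generated response
--         options: Valid options (e.g., ["A", "B"] or ["Yes", "No"])
--
--     Returns:
--         Extracted choice or None if unclear
--     """
--     response = response.strip().upper()
--
--     # Direct match
--     for option in options:
--         if response == option.upper():
--             return option
--
--     # First character match
--     for option in options:
--         if response.startswith(option.upper()):
--             return option
--
--     # Search for option in response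
--     for option in options:
--         if option.upper() in response:
--             return option
--
--     return None
-- ===== SOURCE B (Python) =====
-- from typing import Optional
--
-- def extract_choice(response: str, options: list[str]) -> Optional[str]:
--     response = response.strip().upper()
--     best = None
--     best_tier = 4
--     for option in options:
--         u = option.upper()
--         if response == u:
--             tier = 1
--         elif response.startswith(u):
--             tier = 2
--         elif u in response:
--             tier = 3
--         else:
--             continue
--         if tier < best_tier:
--             best_tier = tier
--             best = option
--     return best
-- ===== Notes on version B (the rewrite author's own statement) =====
-- stated objective: alternative
-- what changed: Replaces A's three priority-ordered scans over options with a single pass that assigns each option a match tier (1 exact, 2 prefix, 3 substring) and keeps the first option at the lowest tier via a strict-less-than update.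
import Mathlib
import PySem

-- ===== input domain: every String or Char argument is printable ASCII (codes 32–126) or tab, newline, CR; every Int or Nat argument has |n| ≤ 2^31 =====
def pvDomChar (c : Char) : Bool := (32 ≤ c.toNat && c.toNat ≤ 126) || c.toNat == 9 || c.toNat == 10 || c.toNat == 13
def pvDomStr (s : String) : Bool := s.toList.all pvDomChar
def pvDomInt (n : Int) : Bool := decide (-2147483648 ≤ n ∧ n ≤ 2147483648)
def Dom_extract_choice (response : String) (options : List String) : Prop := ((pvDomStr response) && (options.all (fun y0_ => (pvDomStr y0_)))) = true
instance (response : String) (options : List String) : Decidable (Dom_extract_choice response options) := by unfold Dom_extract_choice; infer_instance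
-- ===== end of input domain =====

-- B replaces A's three priority-ordered scans with one pass keeping the best-tier option (alternative decomposition, same cost).


-- ===== PORT A =====
-- A's first loop: exact match
def aLoop1 (r : String) : List String → Option String
  | [] => none
  | o :: rest => if r == PySem.Str.upper o then some o else aLoop1 r rest

-- A's second loop: startswith
def aLoop2 (r : String) : List String → Option String
  | [] => none
  | o :: rest => if PySem.Str.startswith r (PySem.Str.upper o) then some o else aLoop2 r rest

-- A's third loop: substring
def aLoop3 (r : String) : List String → Option String
  | [] => none
  | o :: rest => if PySem.Str.isIn (PySem.Str.upper o) r then some o else aLoop3 r rest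

def extract_choice (response : String) (options : List String) : Option String :=
  let r := PySem.Str.upper (PySem.Str.strip response)
  match aLoop1 r options with
  | some o => some o
  | none =>
    match aLoop2 r options with
    | some o => some o
    | none => aLoop3 r options

-- ===== PORT B =====
-- B's single pass: best_tier / best accumulator, strict-< update
def bLoop (r : String) : List String → Nat → Option String → Option String
  | [], _, best => best
  | o :: rest, bestTier, best =>
    let u := PySem.Str.upper o
    let tier? : Option Nat :=
      if r == u then some 1
      else if PySem.Str.startswith r u then some 2
      else if PySem.Str.isIn u r then some 3
      else none
    match tier? with
    | none => bLoop r rest bestTier best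
    | some t => if t < bestTier then bLoop r rest t (some o) else bLoop r rest bestTier best

def extract_choice_alt (response : String) (options : List String) : Option String :=
  bLoop (PySem.Str.upper (PySem.Str.strip response)) options 4 none

-- ===== PRECONDITION & SPEC =====
def Spec_extract_choice (response : String) (options : List String) (out : Option String) : Prop := out = extract_choice_alt response options
instance (response : String) (options : List String) (out : Option String) : Decidable (Spec_extract_choice response options out) := by unfold Spec_extract_choice; infer_instance

-- ===== CLAIM (what is proved, stated in full; the proofs are below) =====
def Claim_equal_extract_choice : Prop := ∀ (response : String) (options : List String), Dom_extract_choice response options → Spec_extract_choice response options (extract_choice response options)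

-- ===== LEMMAS AND PROOFS =====

-- an exact match is a prefix match
lemma sw_of_eq (r u : String) (h : r = u) : PySem.Str.startswith r u = true := by
  subst h
  simp [PySem.Chars.startswith_iff]

-- a prefix match is a substring match
lemma isIn_of_sw (r u : String) (h : PySem.Str.startswith r u = true) :
    PySem.Str.isIn u r = true := by
  simp only [PySem.Str.startswith_eq] at h
  rw [PySem.Chars.startswith_iff] at h
  simp only [PySem.Str.isIn_eq]
  rw [PySem.Chars.isIn_iff_infix]
  exact h.isInfix

-- B's accumulator loop in terms of A's three scans
lemma bLoop_eq (r : String) (opts : List String) (bt : Nat) (best : Option String) :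
    bLoop r opts bt best =
      if (aLoop1 r opts).isSome ∧ 1 < bt then aLoop1 r opts
      else if (aLoop2 r opts).isSome ∧ 2 < bt then aLoop2 r opts
      else if (aLoop3 r opts).isSome ∧ 3 < bt then aLoop3 r opts
      else best := by
  induction opts generalizing bt best with
  | nil => simp [bLoop, aLoop1, aLoop2, aLoop3]
  | cons o rest ih =>
    by_cases h1 : r == PySem.Str.upper o
    · have h2 : PySem.Str.startswith r (PySem.Str.upper o) = true :=
        sw_of_eq _ _ (by exact_mod_cast (beq_iff_eq.mp h1))
      have h3 := isIn_of_sw _ _ h2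
      simp only [bLoop, aLoop1, aLoop2, aLoop3, h1, h2, h3, if_pos]
      by_cases hbt : 1 < bt
      · rw [if_pos hbt, ih]
        simp [hbt]
      · rw [if_neg hbt, ih]
        have h2' : ¬ (2 < bt) := by omega
        have h3' : ¬ (3 < bt) := by omega
        simp [hbt, h2', h3']
    · by_cases h2 : PySem.Str.startswith r (PySem.Str.upper o)
      · have h3 := isIn_of_sw _ _ h2
        simp only [bLoop, aLoop1, aLoop2, aLoop3, h1, h2, h3, if_true, if_false, Bool.false_eq_true]
        by_cases hbt : 2 < bt
        · rw [if_pos hbt, ih]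
          by_cases hl1 : (aLoop1 r rest).isSome
          · simp [hl1, hbt]; omega
          · simp [hl1, hbt]
        · rw [if_neg hbt, ih]
          have h3' : ¬ (3 < bt) := by omega
          simp [hbt, h3']
      · by_cases h3 : PySem.Str.isIn (PySem.Str.upper o) r
        · simp only [bLoop, aLoop1, aLoop2, aLoop3, h1, h2, h3, if_true, if_false, Bool.false_eq_true]
          by_cases hbt : 3 < bt
          · rw [if_pos hbt, ih]
            by_cases hl1 : (aLoop1 r rest).isSome
            · simp [hl1, hbt]; omega
            · by_cases hl2 : (aLoop2 r rest).isSome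
              · simp [hl1, hl2, hbt]; omega
              · simp [hl1, hl2, hbt]
          · rw [if_neg hbt, ih]
            simp [hbt]
        · simp only [bLoop, aLoop1, aLoop2, aLoop3, h1, h2, h3, if_false, Bool.false_eq_true]
          exact ih bt best

-- ===== VERDICT (by name: the statement is the Claim_ definition above) =====
theorem extract_choice_spec : Claim_equal_extract_choice := by
  intro response options _
  unfold Spec_extract_choice extract_choice extract_choice_alt
  rw [bLoop_eq]
  cases hl1 : aLoop1 (PySem.Str.upper (PySem.Str.strip response)) options with
  | some o => simp [hl1]
  | none =>
    cases hl2 : aLoop2 (PySem.Str.upper (PySem.Str.strip response)) options with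
    | some o => simp [hl1, hl2]
    | none =>
      cases hl3 : aLoop3 (PySem.Str.upper (PySem.Str.strip response)) options with
      | some o => simp [hl1, hl2, hl3]
      | none => simp [hl1, hl2, hl3]
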